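-- pv_equiv track=rewrite | github.com/frances-ai/frances-api | web_app/query_app/controller/utils.py | freq_count
-- ===== SOURCE A (Python) =====
-- def freq_count(results):
--     freq_count={}
--     for year in results:
--         for i in results[year]:
--             if i[0] not in freq_count:
--                 freq_count[i[0]]={}
--                 freq_count[i[0]][year]=i[1]
--
--             else:
--                 if year not in freq_count[i[0]]:
--                     freq_count[i[0]][year]=i[1]
--                 else:
--                     freq_count[i[0]][year]+=i[1]
--     return freq_count
-- ===== SOURCE B (Python) =====
-- def freq_count(results):
--     # pass 1: flatten into a single dict keyed by (word, year)
--     flat = {}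
--     for year, entries in results.items():
--         for word, n in entries:
--             key = (word, year)
--             flat[key] = flat.get(key, 0) + n
--     # pass 2: pivot the flat table into the nested dict
--     nested = {}
--     for (word, year), total in flat.items():
--         if word not in nested:
--             nested[word] = {}
--         nested[word][year] = total
--     return nested
-- ===== Notes on version B (the rewrite author's own statement) =====
-- stated objective: alternative
-- what changed: Replaces the inline nested-dict branching accumulation by two differently-shaped passes: first accumulate into one flat dict keyed by the (word, year) tuple, then pivot that flat table into the nested dict.
import Mathlib
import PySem

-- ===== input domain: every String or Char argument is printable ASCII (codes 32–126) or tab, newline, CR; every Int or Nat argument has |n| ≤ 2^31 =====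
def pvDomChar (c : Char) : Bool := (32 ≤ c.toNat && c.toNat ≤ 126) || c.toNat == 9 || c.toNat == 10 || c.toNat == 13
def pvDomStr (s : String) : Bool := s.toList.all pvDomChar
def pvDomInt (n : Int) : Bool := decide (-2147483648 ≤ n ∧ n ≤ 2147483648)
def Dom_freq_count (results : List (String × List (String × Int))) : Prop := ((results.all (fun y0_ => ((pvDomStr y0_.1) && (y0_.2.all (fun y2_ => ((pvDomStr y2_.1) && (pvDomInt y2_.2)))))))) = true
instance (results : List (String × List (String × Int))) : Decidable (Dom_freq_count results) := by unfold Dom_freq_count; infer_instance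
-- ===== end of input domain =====

-- B replaces A's inline nested-dict branching accumulation by two passes: a flat dict keyed by
-- (word, year), then a pivot of that table into the nested dict; same cost, different shape.
-- The input dict is its association list in insertion order, so A's 'for year in results:
-- for i in results[year]' enumerates exactly its items; the port iterates them in that order.

-- ===== PORT A =====
-- loop body of A (the if/else chain updating freq_count[i[0]]), as a helper
def pyAStep (fc : PySem.Dict String (PySem.Dict String Int)) (year : String)
    (i : String × Int) : PySem.Dict String (PySem.Dict String Int) :=
  if fc.contains i.1 = false then
    fc.insert i.1 ((PySem.Dict.empty).insert year i.2)
  else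
    let inner := fc.getD i.1 PySem.Dict.empty
    if inner.contains year = false then
      fc.insert i.1 (inner.insert year i.2)
    else
      fc.insert i.1 (inner.insert year (inner.getD year 0 + i.2))

def freq_count (results : List (String × List (String × Int))) :
    List (String × List (String × Int)) :=
  let fc := results.foldl (fun fc yr => yr.2.foldl (fun fc i => pyAStep fc yr.1 i) fc)
    PySem.Dict.empty
  fc.items.map (fun p => (p.1, p.2.items))

-- ===== PORT B =====
-- pass 1 body: flat[(word, year)] = flat.get((word, year), 0) + n
def pyBFlatStep (d : PySem.Dict (String × String) Int) (year : String)
    (i : String × Int) : PySem.Dict (String × String) Int :=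
  d.insert (i.1, year) (d.getD (i.1, year) 0 + i.2)

-- pass 2 body: if word not in nested: nested[word] = {}; nested[word][year] = total
def pyBPivotStep (nd : PySem.Dict String (PySem.Dict String Int))
    (q : (String × String) × Int) : PySem.Dict String (PySem.Dict String Int) :=
  let nd := if nd.contains q.1.1 = false then nd.insert q.1.1 PySem.Dict.empty else nd
  nd.insert q.1.1 ((nd.getD q.1.1 PySem.Dict.empty).insert q.1.2 q.2)

def freq_count_alt (results : List (String × List (String × Int))) :
    List (String × List (String × Int)) :=
  let flat := results.foldl (fun d yr => yr.2.foldl (fun d i => pyBFlatStep d yr.1 i) d)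
    PySem.Dict.empty
  let nested := flat.items.foldl pyBPivotStep PySem.Dict.empty
  nested.items.map (fun p => (p.1, p.2.items))

-- ===== PRECONDITION & SPEC =====
def Spec_freq_count (results : List (String × List (String × Int))) (out : List (String × List (String × Int))) : Prop := out = freq_count_alt results
instance (results : List (String × List (String × Int))) (out : List (String × List (String × Int))) : Decidable (Spec_freq_count results out) := by unfold Spec_freq_count; infer_instance

-- ===== CLAIM (what is proved, stated in full; the proofs are below) =====
def Claim_equal_freq_count : Prop := ∀ (results : List (String × List (String × Int))), Dom_freq_count results → Spec_freq_count results (freq_count results)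

-- ===== LEMMAS AND PROOFS =====

-- the stream of (word, year, count) triples both nested loops traverse, in order
def pvTriples (results : List (String × List (String × Int))) : List (String × String × Int) :=
  results.flatMap (fun yr => yr.2.map (fun i => (i.1, yr.1, i.2)))

-- the loop bodies rephrased over a triple
def pvStepA (d : PySem.Dict String (PySem.Dict String Int)) (t : String × String × Int) :
    PySem.Dict String (PySem.Dict String Int) := pyAStep d t.2.1 (t.1, t.2.2)
def pvStepF (d : PySem.Dict (String × String) Int) (t : String × String × Int) :
    PySem.Dict (String × String) Int := pyBFlatStep d t.2.1 (t.1, t.2.2)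

-- canonical descriptions of the dicts the folds build
def pvTot (ts : List (String × String × Int)) (w y : String) : Int :=
  ((ts.filter (fun t => t.1 == w && t.2.1 == y)).map (fun t => t.2.2)).sum
def pvWords (ts : List (String × String × Int)) : List String :=
  PySem.List.dedup (ts.map (fun t => t.1))
def pvYears (ts : List (String × String × Int)) (w : String) : List String :=
  PySem.List.dedup ((ts.filter (fun t => t.1 == w)).map (fun t => t.2.1))
def pvInner (ts : List (String × String × Int)) (w : String) : PySem.Dict String Int :=
  PySem.Dict.mk ((pvYears ts w).map (fun y => (y, pvTot ts w y)))
def pvCanon (ts : List (String × String × Int)) : PySem.Dict String (PySem.Dict String Int) :=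
  PySem.Dict.mk ((pvWords ts).map (fun w => (w, pvInner ts w)))
def pvPairs (ts : List (String × String × Int)) : List (String × String) :=
  PySem.List.dedup (ts.map (fun t => (t.1, t.2.1)))
def pvFlat (ts : List (String × String × Int)) : PySem.Dict (String × String) Int :=
  PySem.Dict.mk ((pvPairs ts).map (fun p => (p, pvTot ts p.1 p.2)))
-- what the pivot pass makes of an arbitrary flat table P: group by word, in order
def pvGW (P : List ((String × String) × Int)) : List String :=
  PySem.List.dedup (P.map (fun q => q.1.1))
def pvGI (P : List ((String × String) × Int)) (w : String) : PySem.Dict String Int :=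
  PySem.Dict.mk ((P.filter (fun q => q.1.1 == w)).map (fun q => (q.1.2, q.2)))
def pvGroup (P : List ((String × String) × Int)) : PySem.Dict String (PySem.Dict String Int) :=
  PySem.Dict.mk ((pvGW P).map (fun w => (w, pvGI P w)))

-- both nested loops are one fold over the triple stream
lemma pv_double_fold {δ : Type} (F : δ → String × String × Int → δ)
    (results : List (String × List (String × Int))) (init : δ) :
    results.foldl (fun d yr => yr.2.foldl (fun d i => F d (i.1, yr.1, i.2)) d) init
      = (pvTriples results).foldl F init := by
  induction results generalizing init with
  | nil => rfl
  | cons yr rest ih => simp [pvTriples, List.foldl_append, List.foldl_map, ih, List.flatMap_cons]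

-- dedup (= Set.ofList) facts, by right induction
lemma pv_dedup_map_dedup {α β : Type} [BEq α] [LawfulBEq α] [BEq β] [LawfulBEq β]
    (f : α → β) (l : List α) :
    PySem.List.dedup ((PySem.List.dedup l).map f) = PySem.List.dedup (l.map f) := by
  simp only [PySem.List.dedup_eq_ofList]
  induction l using List.reverseRecOn with
  | nil => rfl
  | append_singleton l x ih =>
    rw [PySem.Set.ofList_append_singleton, List.map_append, List.map_singleton,
      PySem.Set.ofList_append_singleton, ← ih]
    by_cases hx : x ∈ PySem.Set.ofList l
    · rw [PySem.Set.add_of_mem hx]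
      have : f x ∈ PySem.Set.ofList ((PySem.Set.ofList l).map f) := by
        rw [PySem.Set.mem_ofList]
        exact List.mem_map_of_mem hx
      rw [PySem.Set.add_of_mem this]
    · rw [PySem.Set.add_of_not_mem hx, List.map_append, List.map_singleton,
        PySem.Set.ofList_append_singleton]

lemma pv_filter_dedup {α : Type} [BEq α] [LawfulBEq α] (p : α → Bool) (l : List α) :
    (PySem.List.dedup l).filter p = PySem.List.dedup (l.filter p) := by
  simp only [PySem.List.dedup_eq_ofList]
  induction l using List.reverseRecOn with
  | nil => rfl
  | append_singleton l x ih =>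
    rw [PySem.Set.ofList_append_singleton, List.filter_append]
    by_cases hx : x ∈ PySem.Set.ofList l
    · rw [PySem.Set.add_of_mem hx, ih]
      by_cases hp : p x
      · have : x ∈ l.filter p := List.mem_filter.mpr ⟨(PySem.Set.mem_ofList l x).mp hx, hp⟩
        simp [hp, PySem.Set.ofList_append_singleton,
          PySem.Set.add_of_mem ((PySem.Set.mem_ofList _ _).mpr this)]
      · simp [hp]
    · rw [PySem.Set.add_of_not_mem hx, List.filter_append, ih]
      by_cases hp : p x
      · have hxf : x ∉ l.filter p := fun h => hx ((PySem.Set.mem_ofList l x).mpr (List.mem_filter.mp h).1)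
        simp [hp, PySem.Set.ofList_append_singleton,
          PySem.Set.add_of_not_mem (fun h => hxf ((PySem.Set.mem_ofList _ _).mp h))]
      · simp [hp]

lemma pv_map_snd_dedup_const_fst {α β : Type} [BEq α] [LawfulBEq α] [BEq β] [LawfulBEq β]
    [BEq (α × β)] [LawfulBEq (α × β)]
    (w : α) (l : List (α × β)) (hw : ∀ q ∈ l, q.1 = w) :
    (PySem.List.dedup l).map (fun q => q.2) = PySem.List.dedup (l.map (fun q => q.2)) := by
  simp only [PySem.List.dedup_eq_ofList]
  induction l using List.reverseRecOn with
  | nil => rfl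
  | append_singleton l x ih =>
    have hw' : ∀ q ∈ l, q.1 = w := fun q hq => hw q (List.mem_append_left _ hq)
    rw [PySem.Set.ofList_append_singleton, List.map_append, List.map_singleton,
      PySem.Set.ofList_append_singleton]
    by_cases hx : x ∈ PySem.Set.ofList l
    · rw [PySem.Set.add_of_mem hx, ih hw']
      have : x.2 ∈ PySem.Set.ofList (l.map (fun q => q.2)) := by
        rw [PySem.Set.mem_ofList]
        exact List.mem_map_of_mem ((PySem.Set.mem_ofList _ _).mp hx)
      rw [PySem.Set.add_of_mem this]
    · rw [PySem.Set.add_of_not_mem hx, List.map_append, List.map_singleton, ih hw']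
      have : x.2 ∉ PySem.Set.ofList (l.map (fun q => q.2)) := by
        rw [PySem.Set.mem_ofList]
        intro h
        obtain ⟨q, hq, hq2⟩ := List.mem_map.mp h
        apply hx
        rw [PySem.Set.mem_ofList]
        have : q = x := by
          have h1 : q.1 = w := hw' q hq
          have h2 : x.1 = w := hw x (by simp)
          exact Prod.ext (h1.trans h2.symm) hq2
        rwa [this] at hq
      rw [PySem.Set.add_of_not_mem this]

-- ------------- the A-side fold builds the canonical nested dict -------------

lemma pvInner_append_ne (ts : List (String × String × Int)) (t : String × String × Int)
    (w : String) (h : t.1 ≠ w) : pvInner (ts ++ [t]) w = pvInner ts w := by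
  have hf : (ts ++ [t]).filter (fun u => u.1 == w) = ts.filter (fun u => u.1 == w) := by
    simp [List.filter_append, h]
  have htot : ∀ y, pvTot (ts ++ [t]) w y = pvTot ts w y := by
    intro y; simp [pvTot, List.filter_append, h]
  simp [pvInner, pvYears, hf, htot]

lemma pvTot_append_self (ts : List (String × String × Int)) (w y : String) (c : Int) :
    pvTot (ts ++ [(w, y, c)]) w y = pvTot ts w y + c := by
  simp [pvTot, List.filter_append]

lemma pvTot_append_ne_year (ts : List (String × String × Int)) (w y y' : String) (c : Int)
    (h : y' ≠ y) : pvTot (ts ++ [(w, y, c)]) w y' = pvTot ts w y' := by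
  simp [pvTot, List.filter_append, h.symm]

lemma pvWords_append (ts : List (String × String × Int)) (t : String × String × Int) :
    pvWords (ts ++ [t]) = PySem.Set.add (pvWords ts) t.1 := by
  simp [pvWords, PySem.List.dedup_eq_ofList, ← PySem.Set.ofList_append_singleton]

lemma pvYears_append (ts : List (String × String × Int)) (w y : String) (c : Int) :
    pvYears (ts ++ [(w, y, c)]) w = PySem.Set.add (pvYears ts w) y := by
  simp [pvYears, List.filter_append, PySem.List.dedup_eq_ofList,
    ← PySem.Set.ofList_append_singleton]

lemma pv_mem_words (ts : List (String × String × Int)) (w : String) :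
    w ∈ pvWords ts ↔ w ∈ ts.map (fun t => t.1) := by
  rw [pvWords, PySem.List.dedup_eq_ofList, PySem.Set.mem_ofList]

lemma pv_mem_years (ts : List (String × String × Int)) (w y : String) :
    y ∈ pvYears ts w ↔ y ∈ (ts.filter (fun t => t.1 == w)).map (fun t => t.2.1) := by
  rw [pvYears, PySem.List.dedup_eq_ofList, PySem.Set.mem_ofList]

lemma pv_filter1_nil (ts : List (String × String × Int)) (w : String)
    (h : w ∉ pvWords ts) : ts.filter (fun u => u.1 == w) = [] := by
  rw [List.filter_eq_nil_iff]
  intro u hu hc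
  exact h ((pv_mem_words ts w).mpr (by
    have : u.1 = w := by simpa using hc
    exact this ▸ List.mem_map_of_mem hu))

lemma pv_years_nil (ts : List (String × String × Int)) (w : String)
    (h : w ∉ pvWords ts) : pvYears ts w = [] := by
  rw [pvYears, pv_filter1_nil ts w h]; rfl

lemma pv_tot_zero (ts : List (String × String × Int)) (w y : String)
    (h : y ∉ pvYears ts w) : pvTot ts w y = 0 := by
  have : ts.filter (fun t => t.1 == w && t.2.1 == y) = [] := by
    rw [List.filter_eq_nil_iff]
    intro u hu hc
    have h1 : u.1 = w ∧ u.2.1 = y := by simpa using hc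
    exact h ((pv_mem_years ts w y).mpr (by
      have hm : u ∈ ts.filter (fun t => t.1 == w) :=
        List.mem_filter.mpr ⟨hu, by simp [h1.1]⟩
      exact h1.2 ▸ List.mem_map_of_mem hm))
  simp [pvTot, this]

lemma pvCanon_keys (ts : List (String × String × Int)) :
    (pvCanon ts).keys = pvWords ts := by
  simp [pvCanon, PySem.Dict.keys_mk, List.map_map, Function.comp_def]

lemma pvCanon_nodup (ts : List (String × String × Int)) : (pvCanon ts).keys.Nodup := by
  rw [pvCanon_keys, pvWords]; exact PySem.List.nodup_dedup _

lemma pvCanon_contains (ts : List (String × String × Int)) (w : String) :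
    (pvCanon ts).contains w = decide (w ∈ pvWords ts) := by
  rw [PySem.Dict.contains_eq_decide_mem_keys, pvCanon_keys]

lemma pvCanon_getD (ts : List (String × String × Int)) (w : String) (h : w ∈ pvWords ts)
    (d0 : PySem.Dict String Int) : (pvCanon ts).getD w d0 = pvInner ts w := by
  exact PySem.Dict.getD_of_mem_items (pvCanon ts)
    (show (w, pvInner ts w) ∈ (pvCanon ts).items from List.mem_map_of_mem h)
    (pvCanon_nodup ts) d0

lemma pvInner_keys (ts : List (String × String × Int)) (w : String) :
    (pvInner ts w).keys = pvYears ts w := by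
  simp [pvInner, PySem.Dict.keys_mk, List.map_map, Function.comp_def]

lemma pvInner_nodup (ts : List (String × String × Int)) (w : String) :
    (pvInner ts w).keys.Nodup := by
  rw [pvInner_keys, pvYears]; exact PySem.List.nodup_dedup _

lemma pvInner_contains (ts : List (String × String × Int)) (w y : String) :
    (pvInner ts w).contains y = decide (y ∈ pvYears ts w) := by
  rw [PySem.Dict.contains_eq_decide_mem_keys, pvInner_keys]

lemma pvInner_getD (ts : List (String × String × Int)) (w y : String)
    (h : y ∈ pvYears ts w) (d0 : Int) : (pvInner ts w).getD y d0 = pvTot ts w y := by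
  exact PySem.Dict.getD_of_mem_items (pvInner ts w)
    (show (y, pvTot ts w y) ∈ (pvInner ts w).items from List.mem_map_of_mem h)
    (pvInner_nodup ts w) d0

lemma pvInner_step (ts : List (String × String × Int)) (w y : String) (c : Int) :
    (pvInner ts w).insert y (pvTot ts w y + c) = pvInner (ts ++ [(w, y, c)]) w := by
  apply PySem.Dict.ext
  by_cases hy : y ∈ pvYears ts w
  · rw [PySem.Dict.items_insert_of_contains _ _ (by simp [pvInner_contains, hy])]
    show ((pvYears ts w).map _).map _ = _
    rw [List.map_map, pvInner]
    rw [pvYears_append, PySem.Set.add_of_mem hy]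
    apply List.map_congr_left
    intro y' hy'
    by_cases h' : y' = y
    · subst h'; simp [pvTot_append_self]
    · simp [h', pvTot_append_ne_year ts w y y' c h']
  · rw [PySem.Dict.items_insert_of_not_contains _ _ (by simp [pvInner_contains, hy])]
    show (pvYears ts w).map _ ++ [(y, pvTot ts w y + c)] = _
    rw [pvInner, pvYears_append, PySem.Set.add_of_not_mem hy, List.map_append,
      List.map_singleton]
    congr 1
    · apply List.map_congr_left
      intro y' hy'
      have h' : y' ≠ y := fun h => hy (h ▸ hy')
      simp [pvTot_append_ne_year ts w y y' c h']
    · simp [pvTot_append_self]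

lemma pvA_step (ts : List (String × String × Int)) (t : String × String × Int) :
    pvStepA (pvCanon ts) t = pvCanon (ts ++ [t]) := by
  obtain ⟨w, y, c⟩ := t
  by_cases hw : w ∈ pvWords ts
  · have hc : (pvCanon ts).contains w = true := by simp [pvCanon_contains, hw]
    have hg : (pvCanon ts).getD w PySem.Dict.empty = pvInner ts w :=
      pvCanon_getD ts w hw _
    by_cases hy : y ∈ pvYears ts w
    · have hyc : (pvInner ts w).contains y = true := by simp [pvInner_contains, hy]
      have : pvStepA (pvCanon ts) (w, y, c)
          = (pvCanon ts).insert w ((pvInner ts w).insert y (pvTot ts w y + c)) := by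
        simp [pvStepA, pyAStep, hc, hg, hyc, pvInner_getD ts w y hy]
      rw [this]
      apply PySem.Dict.ext
      rw [PySem.Dict.items_insert_of_contains _ _ hc]
      show ((pvWords ts).map _).map _ = _
      rw [List.map_map, pvCanon, pvWords_append]
      show _ = (PySem.Set.add (pvWords ts) w).map _
      rw [PySem.Set.add_of_mem hw]
      apply List.map_congr_left
      intro w' hw'
      by_cases h' : w' = w
      · subst h'; simp [pvInner_step]
      · simp [h']
        exact (pvInner_append_ne ts (w, y, c) w' (fun h => h' h.symm)).symm
    · have hyc : (pvInner ts w).contains y = false := by simp [pvInner_contains, hy]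
      have : pvStepA (pvCanon ts) (w, y, c)
          = (pvCanon ts).insert w ((pvInner ts w).insert y c) := by
        simp [pvStepA, pyAStep, hc, hg, hyc]
      rw [this]
      have hc2 : (pvInner ts w).insert y c
          = (pvInner ts w).insert y (pvTot ts w y + c) := by
        rw [pv_tot_zero ts w y hy]; ring_nf
      rw [hc2]
      apply PySem.Dict.ext
      rw [PySem.Dict.items_insert_of_contains _ _ hc]
      show ((pvWords ts).map _).map _ = _
      rw [List.map_map, pvCanon, pvWords_append]
      show _ = (PySem.Set.add (pvWords ts) w).map _
      rw [PySem.Set.add_of_mem hw]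
      apply List.map_congr_left
      intro w' hw'
      by_cases h' : w' = w
      · subst h'; simp [pvInner_step]
      · simp [h']
        exact (pvInner_append_ne ts (w, y, c) w' (fun h => h' h.symm)).symm
  · have hc : (pvCanon ts).contains w = false := by simp [pvCanon_contains, hw]
    have : pvStepA (pvCanon ts) (w, y, c)
        = (pvCanon ts).insert w ((PySem.Dict.empty).insert y c) := by
      simp [pvStepA, pyAStep, hc]
    rw [this]
    apply PySem.Dict.ext
    rw [PySem.Dict.items_insert_of_not_contains _ _ hc]
    show (pvWords ts).map _ ++ [(w, (PySem.Dict.empty).insert y c)] = _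
    rw [pvCanon, pvWords_append]
    show _ = (PySem.Set.add (pvWords ts) w).map _
    rw [PySem.Set.add_of_not_mem hw, List.map_append, List.map_singleton]
    congr 1
    · apply List.map_congr_left
      intro w' hw'
      have h' : w ≠ w' := fun h => hw (h ▸ hw')
      simp [pvInner_append_ne ts (w, y, c) w' h']
    · have h1 : pvYears (ts ++ [(w, y, c)]) w = [y] := by
        rw [pvYears_append, pv_years_nil ts w hw]; rfl
      have h2 : pvTot (ts ++ [(w, y, c)]) w y = c := by
        rw [pvTot_append_self, pv_tot_zero ts w y (by simp [pv_years_nil ts w hw])]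
        ring
      have : pvInner (ts ++ [(w, y, c)]) w = PySem.Dict.mk [(y, c)] := by
        rw [pvInner, h1]; simp [h2]
      rw [this]
      apply congrArg (fun d => [(w, d)])
      apply PySem.Dict.ext
      rw [PySem.Dict.items_insert_of_not_contains _ _ (by rfl)]
      rfl

lemma pvA_eq (ts : List (String × String × Int)) :
    ts.foldl pvStepA PySem.Dict.empty = pvCanon ts := by
  induction ts using List.reverseRecOn with
  | nil => rfl
  | append_singleton ts t ih =>
    rw [List.foldl_append, List.foldl_cons, List.foldl_nil, ih, pvA_step]

-- ------------- the B-side first pass builds the canonical flat dict -------------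

lemma pv_mem_pairs (ts : List (String × String × Int)) (p : String × String) :
    p ∈ pvPairs ts ↔ p ∈ ts.map (fun t => (t.1, t.2.1)) := by
  rw [pvPairs, PySem.List.dedup_eq_ofList, PySem.Set.mem_ofList]

lemma pvPairs_append (ts : List (String × String × Int)) (t : String × String × Int) :
    pvPairs (ts ++ [t]) = PySem.Set.add (pvPairs ts) (t.1, t.2.1) := by
  simp [pvPairs, PySem.List.dedup_eq_ofList, ← PySem.Set.ofList_append_singleton]

lemma pvTot_append_pair_ne (ts : List (String × String × Int)) (w y : String) (c : Int)
    (p : String × String) (h : p ≠ (w, y)) :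
    pvTot (ts ++ [(w, y, c)]) p.1 p.2 = pvTot ts p.1 p.2 := by
  by_cases h1 : w = p.1
  · have h2 : y ≠ p.2 := fun h2 => h (by ext <;> simp [h1, h2])
    simp [pvTot, List.filter_append, h1, h2]
  · simp [pvTot, List.filter_append, h1]

lemma pv_tot_zero_pair (ts : List (String × String × Int)) (w y : String)
    (h : (w, y) ∉ pvPairs ts) : pvTot ts w y = 0 := by
  have : ts.filter (fun t => t.1 == w && t.2.1 == y) = [] := by
    rw [List.filter_eq_nil_iff]
    intro u hu hc
    have h1 : u.1 = w ∧ u.2.1 = y := by simpa using hc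
    exact h ((pv_mem_pairs ts (w, y)).mpr (by
      have h2 : (u.1, u.2.1) ∈ ts.map (fun t => (t.1, t.2.1)) := by
        simpa using List.mem_map_of_mem (f := fun t => (t.1, t.2.1)) hu
      rwa [h1.1, h1.2] at h2))
  simp [pvTot, this]

lemma pvFlat_keys (ts : List (String × String × Int)) : (pvFlat ts).keys = pvPairs ts := by
  simp [pvFlat, PySem.Dict.keys_mk, List.map_map, Function.comp_def]

lemma pvFlat_nodup (ts : List (String × String × Int)) : (pvFlat ts).keys.Nodup := by
  rw [pvFlat_keys, pvPairs]; exact PySem.List.nodup_dedup _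

lemma pvFlat_contains (ts : List (String × String × Int)) (p : String × String) :
    (pvFlat ts).contains p = decide (p ∈ pvPairs ts) := by
  rw [PySem.Dict.contains_eq_decide_mem_keys, pvFlat_keys]

lemma pvFlat_getD (ts : List (String × String × Int)) (p : String × String)
    (h : p ∈ pvPairs ts) (d0 : Int) : (pvFlat ts).getD p d0 = pvTot ts p.1 p.2 := by
  exact PySem.Dict.getD_of_mem_items (pvFlat ts)
    (show (p, pvTot ts p.1 p.2) ∈ (pvFlat ts).items from List.mem_map_of_mem h)
    (pvFlat_nodup ts) d0

lemma pvF_step (ts : List (String × String × Int)) (t : String × String × Int) :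
    pvStepF (pvFlat ts) t = pvFlat (ts ++ [t]) := by
  obtain ⟨w, y, c⟩ := t
  by_cases hp : (w, y) ∈ pvPairs ts
  · have hc : (pvFlat ts).contains (w, y) = true := by simp [pvFlat_contains, hp]
    have : pvStepF (pvFlat ts) (w, y, c)
        = (pvFlat ts).insert (w, y) (pvTot ts w y + c) := by
      simp [pvStepF, pyBFlatStep, pvFlat_getD ts (w, y) hp]
    rw [this]
    apply PySem.Dict.ext
    rw [PySem.Dict.items_insert_of_contains _ _ hc]
    show ((pvPairs ts).map _).map _ = _
    rw [List.map_map, pvFlat, pvPairs_append]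
    show _ = (PySem.Set.add (pvPairs ts) (w, y)).map _
    rw [PySem.Set.add_of_mem hp]
    apply List.map_congr_left
    intro p hp'
    by_cases h' : p = (w, y)
    · subst h'; simp [pvTot_append_self]
    · simp [h', pvTot_append_pair_ne ts w y c p h']
  · have hc : (pvFlat ts).contains (w, y) = false := by simp [pvFlat_contains, hp]
    have hg : (pvFlat ts).getD (w, y) 0 = 0 :=
      PySem.Dict.getD_of_not_contains _ _ hc
    have : pvStepF (pvFlat ts) (w, y, c)
        = (pvFlat ts).insert (w, y) (0 + c) := by
      simp [pvStepF, pyBFlatStep, hg]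
    rw [this]
    apply PySem.Dict.ext
    rw [PySem.Dict.items_insert_of_not_contains _ _ hc]
    show (pvPairs ts).map _ ++ [((w, y), 0 + c)] = _
    rw [pvFlat, pvPairs_append]
    show _ = (PySem.Set.add (pvPairs ts) (w, y)).map _
    rw [PySem.Set.add_of_not_mem hp, List.map_append, List.map_singleton]
    congr 1
    · apply List.map_congr_left
      intro p hp'
      have h' : p ≠ (w, y) := fun h => hp (h ▸ hp')
      simp [pvTot_append_pair_ne ts w y c p h']
    · rw [pvTot_append_self, pv_tot_zero_pair ts w y hp]

lemma pvF_eq (ts : List (String × String × Int)) :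
    ts.foldl pvStepF PySem.Dict.empty = pvFlat ts := by
  induction ts using List.reverseRecOn with
  | nil => rfl
  | append_singleton ts t ih =>
    rw [List.foldl_append, List.foldl_cons, List.foldl_nil, ih, pvF_step]

-- ------------- the pivot pass groups any flat table with distinct keys -------------

lemma pv_mem_gw (P : List ((String × String) × Int)) (w : String) :
    w ∈ pvGW P ↔ w ∈ P.map (fun q => q.1.1) := by
  rw [pvGW, PySem.List.dedup_eq_ofList, PySem.Set.mem_ofList]

lemma pvGW_append (P : List ((String × String) × Int)) (q : (String × String) × Int) :
    pvGW (P ++ [q]) = PySem.Set.add (pvGW P) q.1.1 := by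
  simp [pvGW, PySem.List.dedup_eq_ofList, ← PySem.Set.ofList_append_singleton]

lemma pvGI_append_ne (P : List ((String × String) × Int)) (q : (String × String) × Int)
    (w : String) (h : q.1.1 ≠ w) : pvGI (P ++ [q]) w = pvGI P w := by
  simp [pvGI, List.filter_append, h]

lemma pvGI_append_self (P : List ((String × String) × Int)) (q : (String × String) × Int) :
    pvGI (P ++ [q]) q.1.1
      = PySem.Dict.mk ((P.filter (fun p => p.1.1 == q.1.1)).map (fun p => (p.1.2, p.2))
          ++ [(q.1.2, q.2)]) := by
  simp [pvGI, List.filter_append]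

lemma pvGroup_keys (P : List ((String × String) × Int)) : (pvGroup P).keys = pvGW P := by
  simp [pvGroup, PySem.Dict.keys_mk, List.map_map, Function.comp_def]

lemma pvGroup_nodup (P : List ((String × String) × Int)) : (pvGroup P).keys.Nodup := by
  rw [pvGroup_keys, pvGW]; exact PySem.List.nodup_dedup _

lemma pvGroup_contains (P : List ((String × String) × Int)) (w : String) :
    (pvGroup P).contains w = decide (w ∈ pvGW P) := by
  rw [PySem.Dict.contains_eq_decide_mem_keys, pvGroup_keys]

lemma pvGroup_getD (P : List ((String × String) × Int)) (w : String) (h : w ∈ pvGW P)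
    (d0 : PySem.Dict String Int) : (pvGroup P).getD w d0 = pvGI P w := by
  exact PySem.Dict.getD_of_mem_items (pvGroup P)
    (show (w, pvGI P w) ∈ (pvGroup P).items from List.mem_map_of_mem h)
    (pvGroup_nodup P) d0

lemma pvGI_not_contains (P : List ((String × String) × Int)) (w y : String)
    (h : (w, y) ∉ P.map (fun q => q.1)) : (pvGI P w).contains y = false := by
  rw [PySem.Dict.contains_eq_decide_mem_keys]
  simp only [pvGI, PySem.Dict.keys_mk, List.map_map]
  simp only [decide_eq_false_iff_not]
  intro hm
  obtain ⟨p, hp, he⟩ := List.mem_map.mp hm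
  have h1 : p.1.1 = w := by simpa using (List.mem_filter.mp hp).2
  have h2 : p.1.2 = y := by simpa using he
  apply h
  have : p.1 = (w, y) := by rw [← h1, ← h2]
  exact this ▸ List.mem_map_of_mem (List.mem_filter.mp hp).1

lemma pv_gfilter_nil (P : List ((String × String) × Int)) (w : String)
    (h : w ∉ pvGW P) : P.filter (fun q => q.1.1 == w) = [] := by
  rw [List.filter_eq_nil_iff]
  intro p hp hc
  have h1 : p.1.1 = w := by simpa using hc
  exact h ((pv_mem_gw P w).mpr (h1 ▸ List.mem_map_of_mem hp))

lemma pvPivot_step (P : List ((String × String) × Int)) (q : (String × String) × Int)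
    (hkey : q.1 ∉ P.map (fun p => p.1)) :
    pyBPivotStep (pvGroup P) q = pvGroup (P ++ [q]) := by
  obtain ⟨⟨w, y⟩, v⟩ := q
  by_cases hw : w ∈ pvGW P
  · have hc : (pvGroup P).contains w = true := by simp [pvGroup_contains, hw]
    have hg : (pvGroup P).getD w PySem.Dict.empty = pvGI P w := pvGroup_getD P w hw _
    have : pyBPivotStep (pvGroup P) ((w, y), v)
        = (pvGroup P).insert w ((pvGI P w).insert y v) := by
      simp [pyBPivotStep, hc, hg]
    rw [this]
    apply PySem.Dict.ext
    rw [PySem.Dict.items_insert_of_contains _ _ hc]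
    show ((pvGW P).map _).map _ = _
    rw [List.map_map, pvGroup, pvGW_append]
    show _ = (PySem.Set.add (pvGW P) w).map _
    rw [PySem.Set.add_of_mem hw]
    apply List.map_congr_left
    intro w' hw'
    by_cases h' : w' = w
    · subst h'
      have hin : (pvGI P w').insert y v = pvGI (P ++ [((w', y), v)]) w' := by
        apply PySem.Dict.ext
        rw [PySem.Dict.items_insert_of_not_contains _ _ (pvGI_not_contains P w' y hkey)]
        rw [pvGI_append_self]
        rfl
      simp [hin]
    · simp [h', pvGI_append_ne P ((w, y), v) w' (fun h => h' h.symm)]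
  · have hc : (pvGroup P).contains w = false := by simp [pvGroup_contains, hw]
    have : pyBPivotStep (pvGroup P) ((w, y), v)
        = (pvGroup P).insert w ((PySem.Dict.empty).insert y v) := by
      simp only [pyBPivotStep, hc]
      simp [PySem.Dict.getD_insert_self, PySem.Dict.insert_insert_self]
    rw [this]
    apply PySem.Dict.ext
    rw [PySem.Dict.items_insert_of_not_contains _ _ hc]
    show (pvGW P).map _ ++ [(w, (PySem.Dict.empty).insert y v)] = _
    rw [pvGroup, pvGW_append]
    show _ = (PySem.Set.add (pvGW P) w).map _
    rw [PySem.Set.add_of_not_mem hw, List.map_append, List.map_singleton]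
    congr 1
    · apply List.map_congr_left
      intro w' hw'
      have h' : w ≠ w' := fun h => hw (h ▸ hw')
      simp [pvGI_append_ne P ((w, y), v) w' h']
    · have : pvGI (P ++ [((w, y), v)]) w = PySem.Dict.mk [(y, v)] := by
        rw [pvGI_append_self, pv_gfilter_nil P w hw]; rfl
      rw [this]
      apply congrArg (fun d => [(w, d)])
      apply PySem.Dict.ext
      rw [PySem.Dict.items_insert_of_not_contains _ _ (by rfl)]
      rfl

lemma pvPivot_eq (P : List ((String × String) × Int))
    (h : (P.map (fun q => q.1)).Nodup) :
    P.foldl pyBPivotStep PySem.Dict.empty = pvGroup P := by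
  induction P using List.reverseRecOn with
  | nil => rfl
  | append_singleton P q ih =>
    rw [List.map_append] at h
    have h1 := List.Nodup.of_append_left h
    have h2 : q.1 ∉ P.map (fun p => p.1) := by
      intro hm
      have hd := (List.nodup_append.mp h).2.2
      exact hd q.1 hm q.1 (List.mem_map_of_mem (List.mem_singleton_self q)) rfl
    rw [List.foldl_append, List.foldl_cons, List.foldl_nil, ih h1, pvPivot_step P q h2]

-- ------------- pivoting the canonical flat table gives the canonical nested dict -------------

lemma pvGroup_flat (ts : List (String × String × Int)) :
    pvGroup ((pvFlat ts).items) = pvCanon ts := by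
  have hitems : (pvFlat ts).items = (pvPairs ts).map (fun p => (p, pvTot ts p.1 p.2)) := rfl
  have hgw : pvGW ((pvFlat ts).items) = pvWords ts := by
    rw [pvGW, hitems, List.map_map]
    show PySem.List.dedup ((pvPairs ts).map (fun p => p.1)) = _
    rw [pvPairs, pv_dedup_map_dedup, List.map_map]
    rfl
  have hgi : ∀ w, pvGI ((pvFlat ts).items) w = pvInner ts w := by
    intro w
    rw [pvGI, hitems, List.filter_map, List.map_map]
    have hK : ((pvPairs ts).filter ((fun q => q.1.1 == w) ∘ fun p => (p, pvTot ts p.1 p.2)))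
        = (pvPairs ts).filter (fun p => p.1 == w) := rfl
    rw [hK]
    have hmem : ∀ p ∈ (pvPairs ts).filter (fun p => p.1 == w), p.1 = w := by
      intro p hp
      simpa using (List.mem_filter.mp hp).2
    have hcongr : ((pvPairs ts).filter (fun p => p.1 == w)).map
          ((fun q => (q.1.2, q.2)) ∘ fun p => (p, pvTot ts p.1 p.2))
        = ((pvPairs ts).filter (fun p => p.1 == w)).map
          (fun p => ((fun y => (y, pvTot ts w y)) p.2)) := by
      apply List.map_congr_left
      intro p hp
      have := hmem p hp
      simp [this]
    have hsplit : ((pvPairs ts).filter (fun p => p.1 == w)).map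
          (fun p => ((fun y => (y, pvTot ts w y)) p.2))
        = (((pvPairs ts).filter (fun p => p.1 == w)).map (fun p => p.2)).map
          (fun y => (y, pvTot ts w y)) := by
      rw [List.map_map]; rfl
    rw [hcongr, hsplit]
    have hsnd : ((pvPairs ts).filter (fun p => p.1 == w)).map (fun p => p.2)
        = pvYears ts w := by
      rw [pvPairs, pv_filter_dedup]
      have hfm : (ts.map (fun t => (t.1, t.2.1))).filter (fun p => p.1 == w)
          = (ts.filter (fun t => t.1 == w)).map (fun t => (t.1, t.2.1)) := by
        rw [List.filter_map]; rfl
      rw [hfm]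
      rw [pv_map_snd_dedup_const_fst w _ (by
        intro q hq
        obtain ⟨t, ht, he⟩ := List.mem_map.mp hq
        have : t.1 = w := by simpa using (List.mem_filter.mp ht).2
        simp [← he, this])]
      rw [List.map_map]
      rfl
    rw [hsnd]
    rfl
  rw [pvGroup, pvCanon, hgw]
  apply congrArg
  apply List.map_congr_left
  intro w _
  rw [hgi]

-- ===== VERDICT (by name: the statement is the Claim_ definition above) =====
theorem freq_count_spec : Claim_equal_freq_count := by
  intro results _
  unfold Spec_freq_count freq_count freq_count_alt
  dsimp only
  have hA : (fun (fc : PySem.Dict String (PySem.Dict String Int)) (yr : String × List (String × Int)) => yr.2.foldl (fun fc i => pyAStep fc yr.1 i) fc)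
      = (fun fc yr => yr.2.foldl (fun fc i => pvStepA fc (i.1, yr.1, i.2)) fc) := rfl
  have hF : (fun (d : PySem.Dict (String × String) Int) (yr : String × List (String × Int)) => yr.2.foldl (fun d i => pyBFlatStep d yr.1 i) d)
      = (fun d yr => yr.2.foldl (fun d i => pvStepF d (i.1, yr.1, i.2)) d) := rfl
  have hnd : (((pvFlat (pvTriples results)).items).map (fun q => q.1)).Nodup := by
    have he : ((pvFlat (pvTriples results)).items).map (fun q => q.1)
        = pvPairs (pvTriples results) := by
      show ((pvPairs _).map (fun p => (p, pvTot _ p.1 p.2))).map (fun q => q.1) = _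
      simp [List.map_map, Function.comp_def]
    rw [he, pvPairs]
    exact PySem.List.nodup_dedup _
  rw [hA, hF, pv_double_fold pvStepA, pv_double_fold pvStepF, pvA_eq, pvF_eq,
    pvPivot_eq _ hnd, pvGroup_flat]
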